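-- pv_equiv track=rewrite | github.com/Belaleatsbanana/Skills | recipes/proof-to-finalanswer/scripts/conversion_utils.py | _extract_transform_problem_section
-- ===== SOURCE A (Python) =====
-- TRANSFORM_PROBLEM_HEADER = "## Final Answer Problem Statement"
--
-- TRANSFORM_FINAL_ANSWER_MARKER = "The unique final answer for the problem statement above is:"
--
-- def _find_header_line(lines: list[str], header_prefix: str) -> int | None:
--     prefix = header_prefix.strip().lower()
--     for idx, line in enumerate(lines):
--         if line.strip().lower().startswith(prefix):
--             return idx
--     return None
--
-- def _extract_transform_problem_section(transform_text: str) -> str | None: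
--     """Extract final-answer problem statement from transform output."""
--     lines = transform_text.splitlines()
--     header_idx = _find_header_line(lines, TRANSFORM_PROBLEM_HEADER)
--     if header_idx is None:
--         return None
--     end_idx = len(lines)
--     for idx in range(header_idx + 1, len(lines)):
--         stripped = lines[idx].strip()
--         if stripped.startswith("## ") or stripped.startswith(TRANSFORM_FINAL_ANSWER_MARKER):
--             end_idx = idx
--             break
--     section = "\n".join(lines[header_idx + 1 : end_idx]).strip()
--     return section or None
-- ===== SOURCE B (Python) =====
-- TRANSFORM_PROBLEM_HEADER = "## Final Answer Problem Statement"
--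
-- TRANSFORM_FINAL_ANSWER_MARKER = "The unique final answer for the problem statement above is:"
--
-- def _extract_transform_problem_section(transform_text: str) -> str | None:
--     """Single pass with a state flag: no indices, no slicing, no second scan."""
--     prefix = TRANSFORM_PROBLEM_HEADER.strip().lower()
--     buf = None
--     for line in transform_text.splitlines():
--         stripped = line.strip()
--         if buf is None:
--             if stripped.lower().startswith(prefix):
--                 buf = []
--         elif stripped.startswith("## ") or stripped.startswith(TRANSFORM_FINAL_ANSWER_MARKER):
--             break
--         else:
--             buf.append(line)
--     if buf is None:
--         return None
--     section = "\n".join(buf).strip()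
--     return section or None
-- ===== Notes on version B (the rewrite author's own statement) =====
-- stated objective: simpler
-- what changed: B replaces A's two index-based passes (find header index, then scan range(header_idx+1, len) for a terminator) plus a list slice and join by a single flag-and-buffer pass over the lines with no indices or slicing.
import Mathlib
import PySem

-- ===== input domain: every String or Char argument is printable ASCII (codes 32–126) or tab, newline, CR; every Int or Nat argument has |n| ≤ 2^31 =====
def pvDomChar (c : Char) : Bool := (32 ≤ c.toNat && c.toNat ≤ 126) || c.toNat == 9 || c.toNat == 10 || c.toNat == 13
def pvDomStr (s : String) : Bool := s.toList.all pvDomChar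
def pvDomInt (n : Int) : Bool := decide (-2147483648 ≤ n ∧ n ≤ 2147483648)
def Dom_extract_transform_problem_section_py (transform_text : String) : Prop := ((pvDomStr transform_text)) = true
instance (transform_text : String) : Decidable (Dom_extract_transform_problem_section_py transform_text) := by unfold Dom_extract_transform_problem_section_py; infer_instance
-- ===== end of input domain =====

-- B replaces A's two index-based scans plus a slice by one flag-and-buffer pass over the lines (simpler decomposition, same cost).

-- shared module constants (as in the Python module) and the terminator test both sources write verbatim
def pvHEADER : String := "## Final Answer Problem Statement"
def pvMARKER : String := "The unique final answer for the problem statement above is:"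
def pvTerm (line : String) : Bool :=
  PySem.Str.startswith (PySem.Str.strip line) "## " || PySem.Str.startswith (PySem.Str.strip line) pvMARKER

-- ===== PORT A =====
-- _find_header_line's enumerate loop with early return
def pvFindHeaderAux (pfx : String) : List String → Int → Option Int
  | [], _ => none
  | line :: rest, idx =>
    if PySem.Str.startswith (PySem.Str.lower (PySem.Str.strip line)) pfx then some idx
    else pvFindHeaderAux pfx rest (idx + 1)

def pvFindHeaderLine (lines : List String) (headerPrefix : String) : Option Int :=
  pvFindHeaderAux (PySem.Str.lower (PySem.Str.strip headerPrefix)) lines 0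

-- A's 'for idx in range(header_idx+1, len(lines))' loop with break; lines[idx] is always in range here
def pvEndScan (lines : List String) : List Int → Int → Int
  | [], endIdx => endIdx
  | idx :: rest, endIdx =>
    if pvTerm (PySem.List.pyGetD lines idx "") then idx else pvEndScan lines rest endIdx

def extract_transform_problem_section_py (transform_text : String) : Option String :=
  let lines := PySem.Str.splitlines transform_text
  match pvFindHeaderLine lines pvHEADER with
  | none => none
  | some headerIdx =>
    let endIdx := pvEndScan lines (PySem.List.pyRange (headerIdx + 1) (lines.length : Int) 1) (lines.length : Int)
    let sect := PySem.Str.strip (PySem.Str.join "\n" (PySem.List.slice lines (some (headerIdx + 1)) (some endIdx)))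
    if sect == "" then none else some sect

-- ===== PORT B =====
-- Source B's single pass: buf = None before the header, a list afterwards, break on a terminator
def pvAltLoop (pfx : String) : List String → Option (List String) → Option (List String)
  | [], buf => buf
  | line :: rest, none =>
    if PySem.Str.startswith (PySem.Str.lower (PySem.Str.strip line)) pfx then pvAltLoop pfx rest (some [])
    else pvAltLoop pfx rest none
  | line :: rest, some buf =>
    if pvTerm line then some buf
    else pvAltLoop pfx rest (some (buf ++ [line]))

def extract_transform_problem_section_py_alt (transform_text : String) : Option String :=
  match pvAltLoop (PySem.Str.lower (PySem.Str.strip pvHEADER)) (PySem.Str.splitlines transform_text) none with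
  | none => none
  | some buf =>
    let sect := PySem.Str.strip (PySem.Str.join "\n" buf)
    if sect == "" then none else some sect

-- ===== PRECONDITION & SPEC =====
def Spec_extract_transform_problem_section_py (transform_text : String) (out : Option String) : Prop := out = extract_transform_problem_section_py_alt transform_text
instance (transform_text : String) (out : Option String) : Decidable (Spec_extract_transform_problem_section_py transform_text out) := by unfold Spec_extract_transform_problem_section_py; infer_instance

-- ===== CLAIM (what is proved, stated in full; the proofs are below) =====
def Claim_equal_extract_transform_problem_section_py : Prop := ∀ (transform_text : String), Dom_extract_transform_problem_section_py transform_text → Spec_extract_transform_problem_section_py transform_text (extract_transform_problem_section_py transform_text)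

-- ===== LEMMAS AND PROOFS =====

-- the find loop shifts its counter
theorem pvShift (pfx : String) (lines : List String) : ∀ i : Int,
    pvFindHeaderAux pfx lines (i + 1) = (pvFindHeaderAux pfx lines i).map (· + 1) := by
  induction lines with
  | nil => intro i; rfl
  | cons l rest ih =>
    intro i
    simp only [pvFindHeaderAux]
    split
    · rfl
    · exact ih (i + 1)

theorem pvNonneg (pfx : String) (lines : List String) : ∀ (i h : Int), 0 ≤ i →
    pvFindHeaderAux pfx lines i = some h → 0 ≤ h := by
  induction lines with
  | nil => intro i h _ hx; simp [pvFindHeaderAux] at hx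
  | cons l rest ih =>
    intro i h hi hx
    simp only [pvFindHeaderAux] at hx
    split at hx
    · cases hx; omega
    · exact ih (i + 1) h (by omega) hx

-- the end-scan returns its default or a member of the index list
theorem pvEndScan_mem (lines : List String) : ∀ (ridx : List Int) (d : Int),
    pvEndScan lines ridx d = d ∨ pvEndScan lines ridx d ∈ ridx := by
  intro ridx
  induction ridx with
  | nil => intro d; left; rfl
  | cons i rest ih =>
    intro d
    simp only [pvEndScan]
    split
    · right; exact List.mem_cons_self
    · rcases ih d with h | h
      · left; exact h
      · right; exact List.mem_cons_of_mem _ h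

-- A's end-scan plus slice from any start k is takeWhile of the dropped tail
theorem pvE (lines : List String) : ∀ (k : Nat),
    PySem.List.slice lines (some (k : Int))
        (some (pvEndScan lines (PySem.List.pyRange (k : Int) (lines.length : Int) 1) (lines.length : Int)))
      = (lines.drop k).takeWhile (fun l => !pvTerm l) := by
  suffices H : ∀ (n k : Nat), lines.length - k ≤ n →
      PySem.List.slice lines (some (k : Int))
          (some (pvEndScan lines (PySem.List.pyRange (k : Int) (lines.length : Int) 1) (lines.length : Int)))
        = (lines.drop k).takeWhile (fun l => !pvTerm l) by
    intro k; exact H lines.length k (by omega)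
  intro n
  induction n with
  | zero =>
    intro k hk
    have hlen : lines.length ≤ k := by omega
    rw [PySem.List.pyRange_one_eq_nil (by exact_mod_cast hlen)]
    simp only [pvEndScan, PySem.List.slice_natCast]
    rw [List.drop_of_length_le hlen]
    simp
  | succ n ih =>
    intro k hk
    by_cases hlen : lines.length ≤ k
    · rw [PySem.List.pyRange_one_eq_nil (by exact_mod_cast hlen)]
      simp only [pvEndScan, PySem.List.slice_natCast]
      rw [List.drop_of_length_le hlen]
      simp
    · have hklt : k < lines.length := by omega
      rw [PySem.List.pyRange_one_cons (by exact_mod_cast hklt)]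
      simp only [pvEndScan]
      have hget : PySem.List.pyGetD lines (k : Int) "" = lines[k] := by
        simp [PySem.List.pyGetD, PySem.List.pyGet?, PySem.List.pyIdx?, hklt]
      have hdrop : lines.drop k = lines[k] :: lines.drop (k + 1) :=
        List.drop_eq_getElem_cons hklt
      rw [hget, hdrop]
      by_cases ht : pvTerm lines[k] = true
      · rw [if_pos ht, PySem.List.slice_natCast]
        simp [ht]
      · rw [if_neg ht]
        have hcast : (k : Int) + 1 = ((k + 1 : Nat) : Int) := by push_cast; ring
        rw [hcast]
        set e := pvEndScan lines (PySem.List.pyRange ((k + 1 : Nat) : Int) (lines.length : Int) 1) (lines.length : Int) with he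
        have hge : ((k + 1 : Nat) : Int) ≤ e := by
          rcases pvEndScan_mem lines (PySem.List.pyRange ((k + 1 : Nat) : Int) (lines.length : Int) 1) (lines.length : Int) with h | h
          · rw [← he] at h; rw [h]; exact_mod_cast hklt
          · rw [← he] at h; exact ((PySem.List.mem_pyRange_one).1 h).1
        have h0e : (0 : Int) ≤ e := by omega
        have ihe := ih (k + 1) (by omega)
        rw [← he] at ihe
        rw [PySem.List.slice_toNat lines (Int.natCast_nonneg (k + 1)) h0e] at ihe
        rw [PySem.List.slice_toNat lines (Int.natCast_nonneg k) h0e]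
        simp only [Int.toNat_natCast] at ihe ⊢
        rw [hdrop]
        have hkn : k + 1 ≤ e.toNat := by omega
        have h1 : e.toNat - k = (e.toNat - (k + 1)) + 1 := by omega
        rw [h1, List.take_succ_cons, List.takeWhile_cons]
        simp only [ht, Bool.not_false, if_true]
        rw [← ihe]

-- B's loop once the header was seen collects lines until a terminator
theorem pvB2 (pfx : String) (lines : List String) : ∀ acc : List String,
    pvAltLoop pfx lines (some acc) = some (acc ++ lines.takeWhile (fun l => !pvTerm l)) := by
  induction lines with
  | nil => intro acc; simp [pvAltLoop]
  | cons l rest ih =>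
    intro acc
    simp only [pvAltLoop, List.takeWhile_cons]
    by_cases ht : pvTerm l
    · simp [ht]
    · simp [ht, ih]

-- B's whole loop in terms of A's header search
theorem pvBA (pfx : String) (lines : List String) :
    pvAltLoop pfx lines none =
      match pvFindHeaderAux pfx lines 0 with
      | none => none
      | some h => some ((lines.drop (h.toNat + 1)).takeWhile (fun l => !pvTerm l)) := by
  induction lines with
  | nil => rfl
  | cons l rest ih =>
    simp only [pvAltLoop, pvFindHeaderAux]
    by_cases hh : PySem.Str.startswith (PySem.Str.lower (PySem.Str.strip l)) pfx = true
    · rw [if_pos hh, if_pos hh, pvB2]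
      simp
    · rw [if_neg hh, if_neg hh, ih]
      rw [pvShift pfx rest 0]
      cases haux : pvFindHeaderAux pfx rest 0 with
      | none => rfl
      | some h =>
        have h0 : 0 ≤ h := pvNonneg pfx rest 0 h le_rfl haux
        simp only [Option.map_some]
        have : (h + 1).toNat + 1 = (h.toNat + 1) + 1 := by omega
        rw [this]
        rfl

-- ===== VERDICT (by name: the statement is the Claim_ definition above) =====
theorem extract_transform_problem_section_py_spec : Claim_equal_extract_transform_problem_section_py := by
  intro t _
  unfold Spec_extract_transform_problem_section_py
  unfold extract_transform_problem_section_py extract_transform_problem_section_py_alt pvFindHeaderLine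
  rw [pvBA]
  cases haux : pvFindHeaderAux (PySem.Str.lower (PySem.Str.strip pvHEADER)) (PySem.Str.splitlines t) 0 with
  | none => simp only [haux]
  | some h =>
    have h0 : 0 ≤ h := pvNonneg _ _ 0 h le_rfl haux
    simp only [haux]
    have hE := pvE (PySem.Str.splitlines t) (h.toNat + 1)
    have hcast : ((h.toNat + 1 : Nat) : Int) = h + 1 := by omega
    rw [hcast] at hE
    rw [hE]
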